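-- pv_equiv track=rewrite | github.com/SETI/rms-pds4indextools | pds4indextools/pds4_create_xml_index.py | split_into_elements
-- ===== SOURCE A (Python) =====
-- def split_into_elements(xpath):
--     """
--     Extract elements from an XPath in the order they appear.
--
--     Args:
--         xpath (str): The XPath of a scraped element.
--
--     Returns:
--         tuple: The tuple of elements the XPath is composed of.
--     """
--     elements = []
--     parts = xpath.split('/')
--
--     for part in parts:
--         if '<' in part:
--             part = part.split('<')
--             elements.append(part[0])
--
--     return elements
-- ===== SOURCE B (Python) =====
-- def split_into_elements(xpath):
--     """Single-pass character scan: collect the prefix of each '/'-segment up to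
--     its first '<', emitting it only if the segment contained a '<'."""
--     out = []
--     buf = []
--     seen = False
--     for c in xpath:
--         if c == '/':
--             if seen:
--                 out.append(''.join(buf))
--             buf = []
--             seen = False
--         elif c == '<':
--             seen = True
--         elif not seen:
--             buf.append(c)
--     if seen:
--         out.append(''.join(buf))
--     return out
-- ===== Notes on version B (the rewrite author's own statement) =====
-- stated objective: alternative
-- what changed: Replaced split-on-'/' plus per-part split-on-'<' with a single left-to-right character scan maintaining a prefix buffer and a seen-'<' flag, emitting the buffer at segment boundaries.
import Mathlib
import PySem

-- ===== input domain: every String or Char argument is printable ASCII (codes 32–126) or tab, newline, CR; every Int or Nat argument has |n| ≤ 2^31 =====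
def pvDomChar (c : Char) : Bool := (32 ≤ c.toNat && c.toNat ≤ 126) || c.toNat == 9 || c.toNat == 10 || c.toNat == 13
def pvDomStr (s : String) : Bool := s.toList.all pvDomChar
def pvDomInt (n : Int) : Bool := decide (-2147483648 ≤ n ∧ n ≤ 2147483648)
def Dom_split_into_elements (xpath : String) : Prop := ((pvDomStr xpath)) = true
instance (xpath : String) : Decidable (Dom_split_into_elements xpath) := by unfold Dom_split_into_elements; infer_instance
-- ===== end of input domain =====

-- B replaces A's split-on-'/' + per-part split-on-'<' by a single character scan with a prefix buffer; alternative decomposition, same cost.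


-- ===== PORT A =====
def split_into_elements (xpath : String) : List String :=
  let parts := PySem.Chars.splitOn xpath.toList ['/']
  parts.foldl (fun elements part =>
    if PySem.Chars.isIn ['<'] part then
      let part2 := PySem.Chars.splitOn part ['<']
      elements ++ [String.ofList (PySem.List.pyGetD part2 0 [])]
    else elements) []

-- ===== PORT B =====
def pvAltStep (st : List String × List Char × Bool) (c : Char) : List String × List Char × Bool :=
  let (out, buf, seen) := st
  if c = '/' then ((if seen then out ++ [String.ofList buf] else out), [], false)
  else if c = '<' then (out, buf, true)
  else if seen then (out, buf, seen)
  else (out, buf ++ [c], seen)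

def split_into_elements_alt (xpath : String) : List String :=
  let st := xpath.toList.foldl pvAltStep ([], [], false)
  if st.2.2 then st.1 ++ [String.ofList st.2.1] else st.1

-- ===== PRECONDITION & SPEC =====
def Spec_split_into_elements (xpath : String) (out : List String) : Prop := out = split_into_elements_alt xpath
instance (xpath : String) (out : List String) : Decidable (Spec_split_into_elements xpath out) := by unfold Spec_split_into_elements; infer_instance

-- ===== CLAIM (what is proved, stated in full; the proofs are below) =====
def Claim_equal_split_into_elements : Prop := ∀ (xpath : String), Dom_split_into_elements xpath → Spec_split_into_elements xpath (split_into_elements xpath)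

-- ===== LEMMAS AND PROOFS =====

-- A reference single-character splitter (the semantics of splitOn with a one-char separator).
def pvSegSplit (sep : Char) : List Char → List (List Char)
  | [] => [[]]
  | c :: cs => if c = sep then [] :: pvSegSplit sep cs
               else (pvSegSplit sep cs).modifyHead (c :: ·)

theorem pvSegSplit_ne_nil (sep : Char) (cs : List Char) : pvSegSplit sep cs ≠ [] := by
  induction cs with
  | nil => simp [pvSegSplit]
  | cons c cs ih =>
    simp only [pvSegSplit]
    split
    · simp
    · cases h : pvSegSplit sep cs with
      | nil => exact absurd h ih
      | cons s ss => simp [List.modifyHead]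

theorem pvSplitOn_go_eq (sep : Char) (fuel : Nat) :
    ∀ (l cur : List Char) (accs : List (List Char)), l.length < fuel →
    PySem.Chars.splitOn.go [sep] fuel l cur accs
      = accs.reverse ++ (pvSegSplit sep l).modifyHead (cur.reverse ++ ·) := by
  induction fuel with
  | zero => intro l cur accs h; omega
  | succ fuel ih =>
    intro l cur accs h
    cases l with
    | nil =>
      rw [PySem.Chars.splitOn.go]
      simp [pvSegSplit, List.modifyHead]
      omega
    | cons c rest =>
      rw [PySem.Chars.splitOn.go]
      by_cases hc : c = sep
      · subst hc
        have hpre : [c].isPrefixOf (c :: rest) = true := by simp [List.isPrefixOf]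
        rw [if_pos hpre]
        simp only [List.length_singleton, List.drop_succ_cons, List.drop_zero]
        simp only [List.length_cons] at h
        rw [ih rest [] (cur.reverse :: accs) (by omega)]
        cases hs : pvSegSplit c rest with
        | nil => exact absurd hs (pvSegSplit_ne_nil c rest)
        | cons s ss => simp [pvSegSplit, List.modifyHead, hs]
      · have hpre : [sep].isPrefixOf (c :: rest) = false := by
          simp [List.isPrefixOf]; exact fun hh => absurd hh.symm hc
        rw [if_neg (by simp [hpre])]
        simp only [List.length_cons] at h
        rw [ih rest (c :: cur) accs (by omega)]
        cases hs : pvSegSplit sep rest with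
        | nil => exact absurd hs (pvSegSplit_ne_nil sep rest)
        | cons s ss => simp [pvSegSplit, List.modifyHead, hs, hc]

theorem pvSplitOn_eq (sep : Char) (l : List Char) :
    PySem.Chars.splitOn l [sep] = pvSegSplit sep l := by
  rw [PySem.Chars.splitOn, pvSplitOn_go_eq sep (l.length + 1) l [] [] (by omega)]
  cases hs : pvSegSplit sep l with
  | nil => exact absurd hs (pvSegSplit_ne_nil sep l)
  | cons s ss => simp [List.modifyHead]

-- head of the '<'-split is the prefix before the first '<'
theorem pvSegSplit_head (sep : Char) (p : List Char) :
    (pvSegSplit sep p).headD [] = p.takeWhile (· ≠ sep) := by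
  induction p with
  | nil => simp [pvSegSplit]
  | cons c p ih =>
    simp only [pvSegSplit]
    by_cases hc : c = sep
    · simp [hc]
    · cases hs : pvSegSplit sep p with
      | nil => exact absurd hs (pvSegSplit_ne_nil sep p)
      | cons s ss =>
        rw [hs] at ih
        simp only [List.headD_cons] at ih
        simp [List.modifyHead, hc, ih]

theorem pvIsIn_singleton (c : Char) (p : List Char) :
    PySem.Chars.isIn [c] p = true ↔ c ∈ p := by
  rw [PySem.Chars.isIn_iff_infix]
  exact List.singleton_infix_iff c p

-- A's loop body
def pvAStep (elements : List String) (part : List Char) : List String :=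
  if PySem.Chars.isIn ['<'] part then
    elements ++ [String.ofList (PySem.List.pyGetD (PySem.Chars.splitOn part ['<']) 0 [])]
  else elements

theorem pvAStep_lt (acc : List String) (buf s : List Char) (hbuf : '<' ∉ buf) :
    pvAStep acc (buf ++ '<' :: s) = acc ++ [String.ofList buf] := by
  have hin : PySem.Chars.isIn ['<'] (buf ++ '<' :: s) = true :=
    (pvIsIn_singleton _ _).mpr (by simp)
  simp only [pvAStep, hin, if_pos]
  rw [pvSplitOn_eq]
  cases hs : pvSegSplit '<' (buf ++ '<' :: s) with
  | nil => exact absurd hs (pvSegSplit_ne_nil _ _)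
  | cons t ts =>
    have hh := pvSegSplit_head '<' (buf ++ '<' :: s)
    rw [hs] at hh
    simp only [List.headD_cons] at hh
    have hbuf' : List.takeWhile (fun x => decide (x ≠ '<')) (buf ++ '<' :: s) = buf := by
      rw [List.takeWhile_append]
      simp
      exact fun _ x hx h2 => hbuf (h2 ▸ hx)
    rw [PySem.List.pyGetD_zero]
    simp only [List.getD_cons_zero]
    rw [hh, hbuf']

theorem pvAStep_nolt (acc : List String) (buf : List Char) (hbuf : '<' ∉ buf) :
    pvAStep acc buf = acc := by
  have : PySem.Chars.isIn ['<'] buf = false := by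
    cases h : PySem.Chars.isIn ['<'] buf
    · rfl
    · exact absurd ((pvIsIn_singleton _ _).mp h) hbuf
  simp [pvAStep, this]

theorem pvMain (cs : List Char) : ∀ (acc : List String) (buf : List Char) (seen : Bool),
    (seen = false → '<' ∉ buf) →
    (if (cs.foldl pvAltStep (acc, buf, seen)).2.2 then
        (cs.foldl pvAltStep (acc, buf, seen)).1 ++ [String.ofList (cs.foldl pvAltStep (acc, buf, seen)).2.1]
     else (cs.foldl pvAltStep (acc, buf, seen)).1)
      = if seen then
          ((pvSegSplit '/' cs).tail).foldl pvAStep (acc ++ [String.ofList buf])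
        else
          ((pvSegSplit '/' cs).modifyHead (buf ++ ·)).foldl pvAStep acc := by
  induction cs with
  | nil =>
    intro acc buf seen hbuf
    cases seen with
    | true => simp [pvSegSplit]
    | false =>
      simp [pvSegSplit, List.modifyHead]
      exact (pvAStep_nolt acc buf (hbuf rfl)).symm
  | cons c cs ih =>
    intro acc buf seen hbuf
    simp only [List.foldl_cons]
    by_cases hslash : c = '/'
    · subst hslash
      have hstep : pvAltStep (acc, buf, seen) '/' =
          ((if seen then acc ++ [String.ofList buf] else acc), [], false) := by
        simp [pvAltStep]
      rw [hstep, ih _ [] false (by simp)]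
      have hseg : pvSegSplit '/' ('/' :: cs) = [] :: pvSegSplit '/' cs := by
        simp [pvSegSplit]
      cases seen with
      | true =>
        simp only [if_pos, hseg, List.tail_cons]
        cases hs : pvSegSplit '/' cs with
        | nil => exact absurd hs (pvSegSplit_ne_nil _ _)
        | cons t ts => simp [List.modifyHead]
      | false =>
        simp only [hseg]
        simp only [Bool.false_eq_true, if_false]
        cases hs : pvSegSplit '/' cs with
        | nil => exact absurd hs (pvSegSplit_ne_nil _ _)
        | cons t ts =>
          simp only [List.modifyHead, List.foldl_cons, List.append_nil]
          rw [pvAStep_nolt acc buf (hbuf rfl)]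
          simp
    · by_cases hlt : c = '<'
      · subst hlt
        have hstep : pvAltStep (acc, buf, seen) '<' = (acc, buf, true) := by
          simp [pvAltStep]
        rw [hstep, ih acc buf true (by simp)]
        have hseg : pvSegSplit '/' ('<' :: cs) = (pvSegSplit '/' cs).modifyHead ('<' :: ·) := by
          simp [pvSegSplit]
        cases hs : pvSegSplit '/' cs with
        | nil => exact absurd hs (pvSegSplit_ne_nil _ _)
        | cons t ts =>
          cases seen with
          | true => simp [hseg, hs, List.modifyHead]
          | false =>
            simp only [if_pos, Bool.false_eq_true, if_false, hseg, hs, List.modifyHead,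
              List.foldl_cons, List.tail_cons]
            rw [pvAStep_lt acc buf t (hbuf rfl)]
      · have hstep : pvAltStep (acc, buf, seen) c =
            (if seen then (acc, buf, seen) else (acc, buf ++ [c], seen)) := by
          cases seen <;> simp [pvAltStep, hslash, hlt]
        have hseg : pvSegSplit '/' (c :: cs) = (pvSegSplit '/' cs).modifyHead (c :: ·) := by
          simp [pvSegSplit, hslash]
        cases hs : pvSegSplit '/' cs with
        | nil => exact absurd hs (pvSegSplit_ne_nil _ _)
        | cons t ts =>
          cases seen with
          | true =>
            simp only [if_pos] at hstep ⊢
            rw [hstep, ih acc buf true (by simp)]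
            simp [hseg, hs, List.modifyHead]
          | false =>
            simp only [Bool.false_eq_true, if_false] at hstep ⊢
            have hbuf' : '<' ∉ buf ++ [c] := by
              simp [hbuf rfl]
              exact fun h => hlt h.symm
            rw [hstep, ih acc (buf ++ [c]) false (fun _ => hbuf')]
            simp [hseg, hs, List.modifyHead]

-- ===== VERDICT (by name: the statement is the Claim_ definition above) =====
theorem split_into_elements_spec : Claim_equal_split_into_elements := by
  intro xpath _
  unfold Spec_split_into_elements split_into_elements split_into_elements_alt
  rw [pvSplitOn_eq]
  have h := pvMain xpath.toList [] [] false (by simp)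
  simp only [Bool.false_eq_true, if_false] at h
  rw [h]
  cases hs : pvSegSplit '/' xpath.toList with
  | nil => exact absurd hs (pvSegSplit_ne_nil _ _)
  | cons t ts =>
    simp only [List.modifyHead, List.nil_append, List.foldl_cons]
    rfl
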